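-- pv_equiv track=rewrite | github.com/Cute-Yang/blue_sky | feature_extract/evidence_feature.py | spread_feature
-- ===== SOURCE A (Python) =====
-- DEVICE_SPEAD=2
--
-- BINDCARD_SPEAD=1
--
-- def spread_feature(spread_account_data,key="related_type"):
--     same_device_account_number=0
--     same_idcard_account_number=0
--     spread_all_acc_cnt=0
--     for account_data in spread_account_data:
--         related_type=account_data[key]
--         if related_type==DEVICE_SPEAD:
--             same_device_account_number+=1
--         elif related_type==BINDCARD_SPEAD:
--             same_idcard_account_number+=1
--         spread_all_acc_cnt+=1
--
--     return [
--         spread_all_acc_cnt,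
--         same_device_account_number,
--         same_idcard_account_number
--     ]
-- ===== SOURCE B (Python) =====
-- DEVICE_SPEAD = 2
--
-- BINDCARD_SPEAD = 1
--
-- def spread_feature(spread_account_data, key="related_type"):
--     types = [account_data[key] for account_data in spread_account_data]
--     return [len(types), types.count(DEVICE_SPEAD), types.count(BINDCARD_SPEAD)]
-- ===== Notes on version B (the rewrite author's own statement) =====
-- stated objective: simpler
-- what changed: Replaces the branchy single pass maintaining three counters with a materialise-then-count decomposition: extract the key values once, then use len and list.count.
import Mathlib
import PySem

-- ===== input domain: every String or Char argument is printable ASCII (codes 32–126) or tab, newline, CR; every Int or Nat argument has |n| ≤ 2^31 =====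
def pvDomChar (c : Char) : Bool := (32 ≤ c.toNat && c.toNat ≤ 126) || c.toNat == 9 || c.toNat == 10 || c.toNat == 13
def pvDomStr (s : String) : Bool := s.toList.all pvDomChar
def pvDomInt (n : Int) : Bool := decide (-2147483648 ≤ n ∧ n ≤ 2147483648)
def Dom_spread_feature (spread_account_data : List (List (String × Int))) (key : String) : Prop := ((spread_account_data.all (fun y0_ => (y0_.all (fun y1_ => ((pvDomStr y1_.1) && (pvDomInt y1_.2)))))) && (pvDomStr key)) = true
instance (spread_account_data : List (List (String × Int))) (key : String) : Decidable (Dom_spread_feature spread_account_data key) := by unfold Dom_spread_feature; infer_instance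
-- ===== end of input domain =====

-- ===== PORT A =====
-- B changes A's branchy single pass with three counters into materialise-the-key-values-then-count (simpler decomposition).
-- account_data[key]: first-match association-list lookup (dict access); default 0 is never reached under Pre_.
def pvGetKey (account_data : List (String × Int)) (key : String) : Int :=
  ((account_data.find? (fun p => p.1 == key)).map (·.2)).getD 0

def spread_feature (spread_account_data : List (List (String × Int))) (key : String) : List Int :=
  let st := spread_account_data.foldl
    (fun (st : Int × Int × Int) account_data =>
      let related_type := pvGetKey account_data key
      let st :=
        if related_type = 2 then (st.1 + 1, st.2.1, st.2.2)
        else if related_type = 1 then (st.1, st.2.1 + 1, st.2.2)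
        else st
      (st.1, st.2.1, st.2.2 + 1))
    (0, 0, 0)
  [st.2.2, st.1, st.2.1]

-- ===== PORT B =====
def spread_feature_alt (spread_account_data : List (List (String × Int))) (key : String) : List Int :=
  let types := spread_account_data.map (fun account_data => pvGetKey account_data key)
  [(types.length : Int), (types.count 2 : Int), (types.count 1 : Int)]

-- ===== PRECONDITION & SPEC =====
-- Pre_ excludes exactly the inputs where A raises KeyError: some account dict lacks the key.
def Pre_spread_feature (spread_account_data : List (List (String × Int))) (key : String) : Prop :=
  ∀ account_data ∈ spread_account_data, (account_data.find? (fun p => p.1 == key)).isSome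

instance (spread_account_data : List (List (String × Int))) (key : String) : Decidable (Pre_spread_feature spread_account_data key) := by unfold Pre_spread_feature; infer_instance

def pvWitness_spread_feature : (List (List (String × Int))) × String :=
  ([[("related_type", 2)], [("related_type", 1)], [("related_type", 5)]], "related_type")

def Spec_spread_feature (spread_account_data : List (List (String × Int))) (key : String) (out : List Int) : Prop := out = spread_feature_alt spread_account_data key
instance (spread_account_data : List (List (String × Int))) (key : String) (out : List Int) : Decidable (Spec_spread_feature spread_account_data key out) := by unfold Spec_spread_feature; infer_instance

-- ===== CLAIM (what is proved, stated in full; the proofs are below) =====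
def Claim_equal_spread_feature : Prop := ∀ (spread_account_data : List (List (String × Int))) (key : String), Dom_spread_feature spread_account_data key → Pre_spread_feature spread_account_data key → Spec_spread_feature spread_account_data key (spread_feature spread_account_data key)

-- ===== LEMMAS AND PROOFS =====

lemma spread_feature_loop (l : List (List (String × Int))) (key : String) (a b c : Int) :
    l.foldl
      (fun (st : Int × Int × Int) account_data =>
        let related_type := pvGetKey account_data key
        let st :=
          if related_type = 2 then (st.1 + 1, st.2.1, st.2.2)
          else if related_type = 1 then (st.1, st.2.1 + 1, st.2.2)
          else st
        (st.1, st.2.1, st.2.2 + 1))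
      (a, b, c)
    = (a + ((l.map (fun d => pvGetKey d key)).count 2 : Int),
       b + ((l.map (fun d => pvGetKey d key)).count 1 : Int),
       c + (l.length : Int)) := by
  induction l generalizing a b c with
  | nil => simp
  | cons hd tl ih =>
    simp only [List.foldl_cons, List.map_cons, List.length_cons]
    rw [ih]
    by_cases h2 : pvGetKey hd key = 2
    · simp [h2]; omega
    · by_cases h1 : pvGetKey hd key = 1
      · simp [h1]; omega
      · simp [h1, h2]; omega

-- ===== VERDICT (by name: the statement is the Claim_ definition above) =====
theorem spread_feature_spec : Claim_equal_spread_feature := by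
  intro data key _ _
  unfold Spec_spread_feature spread_feature spread_feature_alt
  simp only [spread_feature_loop]
  simp
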